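-- pv_equiv track=rewrite | github.com/cindyxinyuzhang/binarysearch | 0194 Text Editor.py | solve
-- ===== SOURCE A (Python) =====
-- def solve(s):
--     stack = []
--     i = 0
--     while i < len(s):
--         if i+1 < len(s) and s[i:i+2] == '<-':
--             if stack: stack.pop()
--             i += 1
--         else:
--             stack.append(s[i])
--         i += 1
--     return  ''.join(stack)
-- ===== SOURCE B (Python) =====
-- def solve(s):
--     parts = s.split('<-')
--     stack = list(parts[0])
--     for p in parts[1:]:
--         if stack:
--             stack.pop()
--         stack.extend(p)
--     return ''.join(stack)
-- ===== Notes on version B (the rewrite author's own statement) =====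
-- stated objective: faster
-- what changed: Replaces the char-by-char index scan with splitting the string on the two-character backspace marker and one pass over the resulting segments, popping once between consecutive segments; correct because occurrences of the marker cannot overlap, so the split matches A's greedy scan.
import Mathlib
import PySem

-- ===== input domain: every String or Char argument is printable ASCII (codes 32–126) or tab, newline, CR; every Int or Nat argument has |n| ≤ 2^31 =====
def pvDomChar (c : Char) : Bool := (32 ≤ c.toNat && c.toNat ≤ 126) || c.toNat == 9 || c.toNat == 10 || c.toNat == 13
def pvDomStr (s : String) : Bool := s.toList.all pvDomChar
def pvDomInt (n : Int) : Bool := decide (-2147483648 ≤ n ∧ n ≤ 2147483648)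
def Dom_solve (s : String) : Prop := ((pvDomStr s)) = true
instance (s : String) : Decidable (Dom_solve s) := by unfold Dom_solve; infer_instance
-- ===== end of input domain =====

-- B applies backspaces by splitting on "<-" and doing one pass over the segments
-- (pop once between consecutive segments) instead of A's char-by-char index scan.

-- ===== PORT A =====
-- A's index loop over s, ported as structural recursion on the remaining characters;
-- the test `i+1 < len(s) and s[i:i+2] == '<-'` is the pattern on the next two chars.
def solveAuxA : List Char → List Char → List Char
  | [], stack => stack
  | '<' :: '-' :: cs, stack => solveAuxA cs (if stack = [] then stack else stack.dropLast)
  | c :: cs, stack => solveAuxA cs (stack ++ [c])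

def solve (s : String) : String := String.ofList (solveAuxA s.toList [])

-- ===== PORT B =====
-- step of Source B's for-loop: 'if stack: stack.pop(); stack.extend(p)'
def solveStepB (stack : List Char) (p : List Char) : List Char :=
  (if stack = [] then stack else stack.dropLast) ++ p

def solve_alt (s : String) : String :=
  match PySem.Chars.splitOn s.toList ['<', '-'] with
  | [] => ""   -- unreachable: split always yields at least one piece
  | p0 :: rest => String.ofList (rest.foldl solveStepB p0)

-- ===== PRECONDITION & SPEC =====
def Spec_solve (s : String) (out : String) : Prop := out = solve_alt s
instance (s : String) (out : String) : Decidable (Spec_solve s out) := by unfold Spec_solve; infer_instance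

-- ===== CLAIM (what is proved, stated in full; the proofs are below) =====
def Claim_equal_solve : Prop := ∀ (s : String), Dom_solve s → Spec_solve s (solve s)

-- ===== LEMMAS AND PROOFS =====

-- a structural-recursion characterisation of PySem.Chars.splitOn for the separator "<-"
def mySplit : List Char → List (List Char)
  | [] => [[]]
  | '<' :: '-' :: rest => [] :: mySplit rest
  | c :: rest => (mySplit rest).modifyHead (c :: ·)

theorem mySplit_cons (c : Char) (cs : List Char) (h : ¬(c = '<' ∧ ∃ r, cs = '-' :: r)) :
    mySplit (c :: cs) = (mySplit cs).modifyHead (c :: ·) := by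
  rw [mySplit.eq_def]
  split
  · simp_all
  · rename_i r heq
    injection heq with h1 h2
    exact absurd ⟨h1, r, h2⟩ h
  · rename_i c' r heq
    injection heq with h1 h2
    rw [h1, h2]

theorem solveAuxA_cons (c : Char) (cs : List Char) (stack : List Char)
    (h : ¬(c = '<' ∧ ∃ r, cs = '-' :: r)) :
    solveAuxA (c :: cs) stack = solveAuxA cs (stack ++ [c]) := by
  rw [solveAuxA.eq_def]
  split
  · simp_all
  · rename_i st r heq
    injection heq with h1 h2
    exact absurd ⟨h1, r, h2⟩ h
  · rename_i st c' r heq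
    injection heq with h1 h2
    rw [h1, h2]

theorem mySplit_ne_nil (l : List Char) : mySplit l ≠ [] := by
  induction l using mySplit.induct with
  | case1 => simp [mySplit]
  | case2 rest ih => simp [mySplit]
  | case3 c rest h1 ih =>
    rw [mySplit_cons c rest (by rintro ⟨rfl, r, rfl⟩; exact h1 r rfl rfl)]
    cases h : mySplit rest <;> simp_all

theorem prefix_iff (c : Char) (cs : List Char) :
    List.isPrefixOf ['<', '-'] (c :: cs) = true ↔ (c = '<' ∧ ∃ r, cs = '-' :: r) := by
  cases cs with
  | nil => simp [List.isPrefixOf]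
  | cons d ds =>
    constructor
    · intro hp
      simp only [List.isPrefixOf, Bool.and_eq_true, beq_iff_eq] at hp
      exact ⟨hp.1.symm, ds, by rw [hp.2.1.symm]⟩
    · rintro ⟨rfl, r, heq⟩
      injection heq with h1 h2
      subst h1
      simp [List.isPrefixOf]

theorem go_eq (fuel : Nat) (l cur : List Char) (acc : List (List Char)) (h : l.length ≤ fuel) :
    PySem.Chars.splitOn.go ['<', '-'] fuel l cur acc
      = acc.reverse ++ (mySplit l).modifyHead (cur.reverse ++ ·) := by
  induction fuel generalizing l cur acc with
  | zero =>
    cases l with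
    | nil => simp [PySem.Chars.splitOn.go, mySplit]
    | cons c cs => simp at h
  | succ fuel ih =>
    cases l with
    | nil => simp [PySem.Chars.splitOn.go, mySplit]
    | cons c cs =>
      by_cases hp : List.isPrefixOf ['<', '-'] (c :: cs) = true
      · obtain ⟨rfl, cs', rfl⟩ := (prefix_iff c cs).mp hp
        rw [show PySem.Chars.splitOn.go ['<', '-'] (fuel + 1) ('<' :: '-' :: cs') cur acc
              = PySem.Chars.splitOn.go ['<', '-'] fuel cs' [] (cur.reverse :: acc) by
            simp [PySem.Chars.splitOn.go, hp]]
        rw [ih cs' [] (cur.reverse :: acc) (by simp at h; omega)]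
        rw [show mySplit ('<' :: '-' :: cs') = [] :: mySplit cs' from rfl]
        cases hms : mySplit cs' with
        | nil => exact absurd hms (mySplit_ne_nil cs')
        | cons q qs => simp
      · rw [show PySem.Chars.splitOn.go ['<', '-'] (fuel + 1) (c :: cs) cur acc
              = PySem.Chars.splitOn.go ['<', '-'] fuel cs (c :: cur) acc by
            simp [PySem.Chars.splitOn.go, hp]]
        rw [ih cs (c :: cur) acc (by simp at h; omega)]
        rw [mySplit_cons c cs (fun hx => hp ((prefix_iff c cs).mpr hx))]
        cases hms : mySplit cs with
        | nil => exact absurd hms (mySplit_ne_nil cs)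
        | cons q qs => simp [hms]

theorem splitOn_eq (l : List Char) :
    PySem.Chars.splitOn l ['<', '-'] = mySplit l := by
  have h := go_eq (l.length + 1) l [] [] (by omega)
  rw [PySem.Chars.splitOn, h]
  cases hms : mySplit l with
  | nil => exact absurd hms (mySplit_ne_nil l)
  | cons q qs => simp

theorem main_eq (cs stack : List Char) :
    solveAuxA cs stack
      = match mySplit cs with
        | [] => stack
        | p0 :: rest => rest.foldl solveStepB (stack ++ p0) := by
  induction cs using mySplit.induct generalizing stack with
  | case1 => simp [solveAuxA, mySplit]
  | case2 rest ih =>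
    rw [show mySplit ('<' :: '-' :: rest) = [] :: mySplit rest from rfl]
    rw [show solveAuxA ('<' :: '-' :: rest) stack
          = solveAuxA rest (if stack = [] then stack else stack.dropLast) from rfl]
    rw [ih]
    cases hms : mySplit rest with
    | nil => exact absurd hms (mySplit_ne_nil rest)
    | cons q qs => simp [List.foldl_cons, solveStepB]
  | case3 c rest h1 ih =>
    have hno : ¬(c = '<' ∧ ∃ r, rest = '-' :: r) := by
      rintro ⟨rfl, r, rfl⟩; exact h1 r rfl rfl
    rw [solveAuxA_cons c rest stack hno, ih, mySplit_cons c rest hno]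
    cases hms : mySplit rest with
    | nil => exact absurd hms (mySplit_ne_nil rest)
    | cons q qs => simp

-- ===== VERDICT (by name: the statement is the Claim_ definition above) =====
theorem solve_spec : Claim_equal_solve := by
  intro s _
  unfold Spec_solve solve solve_alt
  rw [splitOn_eq, main_eq]
  cases hms : mySplit s.toList with
  | nil => exact absurd hms (mySplit_ne_nil s.toList)
  | cons q qs => simp
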